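-- pv_equiv track=rewrite | github.com/gulu864/Time-and-space-complexity-afterclass | Power_of_8Afterclass.py | is_power_of_8
-- ===== SOURCE A (Python) =====
-- def is_power_of_8(n):
--     if n <= 0 or (n & (n - 1)) != 0:
--         return False
--     position = 0
--     while n > 1:
--         n >>= 1
--         position += 1
--     return position % 3 == 0
-- ===== SOURCE B (Python) =====
-- def is_power_of_8(n):
--     if n <= 0:
--         return False
--     while n % 8 == 0:
--         n //= 8
--     return n == 1
-- ===== Notes on version B (the rewrite author's own statement) =====
-- stated objective: simpler
-- what changed: Replaces the power-of-two bit trick plus a bit-shift counter tested modulo 3 by a single loop that strips factors of 8 and checks the remainder equals 1.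
import Mathlib
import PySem

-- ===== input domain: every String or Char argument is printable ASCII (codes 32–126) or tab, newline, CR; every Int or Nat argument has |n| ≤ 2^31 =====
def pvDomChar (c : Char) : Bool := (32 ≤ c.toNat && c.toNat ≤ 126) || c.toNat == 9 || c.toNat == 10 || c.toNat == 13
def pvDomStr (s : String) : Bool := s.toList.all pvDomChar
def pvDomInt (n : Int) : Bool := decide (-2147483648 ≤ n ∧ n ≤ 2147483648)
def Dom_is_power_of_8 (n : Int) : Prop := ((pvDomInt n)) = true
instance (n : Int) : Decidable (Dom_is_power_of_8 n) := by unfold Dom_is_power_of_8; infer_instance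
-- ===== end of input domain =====

-- B replaces A's power-of-two bit trick + shift-count-mod-3 by stripping factors of 8 and
-- checking the remainder equals 1 (objective: simpler).

-- ===== PORT A =====
-- while n > 1: n >>= 1; position += 1   (Python >> 1 on an int is exactly floor division by 2)
def pvALoop (n : Int) (position : Int) : Int :=
  if _h : 1 < n then pvALoop (PySem.Int.floordiv n 2) (position + 1) else position
termination_by n.toNat
decreasing_by
  rw [PySem.Int.floordiv_eq_ediv_of_pos (by omega : (0:Int) < 2)]; omega

-- the two disjuncts of `if n <= 0 or (n & (n-1)) != 0` ported as nested ifs (Python `or`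
-- short-circuits); in the second branch n ≥ 1, where Python's `&` on nonnegative ints is Nat.land
def is_power_of_8 (n : Int) : Bool :=
  if n ≤ 0 then false
  else if (n.toNat &&& (n.toNat - 1)) ≠ 0 then false
  else decide (PySem.Int.mod (pvALoop n 0) 3 = 0)

-- ===== PORT B =====
-- while n % 8 == 0: n //= 8   (only reached with n ≥ 1; the 1 ≤ n conjunct is a totality guard,
-- never false on reached inputs)
def pvBLoop (n : Int) : Int :=
  if h : 1 ≤ n ∧ PySem.Int.mod n 8 = 0 then pvBLoop (PySem.Int.floordiv n 8) else n
termination_by n.toNat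
decreasing_by
  rw [PySem.Int.floordiv_eq_ediv_of_pos (by omega : (0:Int) < 8)]; omega

def is_power_of_8_alt (n : Int) : Bool :=
  if n ≤ 0 then false
  else decide (pvBLoop n = 1)

-- ===== PRECONDITION & SPEC =====
def Spec_is_power_of_8 (n : Int) (out : Bool) : Prop := out = is_power_of_8_alt n
instance (n : Int) (out : Bool) : Decidable (Spec_is_power_of_8 n out) := by unfold Spec_is_power_of_8; infer_instance

-- ===== CLAIM (what is proved, stated in full; the proofs are below) =====
def Claim_equal_is_power_of_8 : Prop := ∀ (n : Int), Dom_is_power_of_8 n → Spec_is_power_of_8 n (is_power_of_8 n)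

-- ===== LEMMAS AND PROOFS =====

theorem pv_land_self (j : Nat) : j &&& j = j :=
  Nat.eq_of_testBit_eq fun i => by simp

-- n & (n-1) == 0 characterises powers of two (for n ≥ 1)
theorem pv_land_pred (m : Nat) (hm : 0 < m) : (m &&& (m - 1) = 0 ↔ ∃ k, m = 2 ^ k) := by
  induction m using Nat.strong_induction_on with
  | _ m ih =>
    rcases Nat.even_or_odd m with ⟨j, hj⟩ | ⟨j, hj⟩
    · -- m = 2*j, j > 0
      have hj0 : 0 < j := by omega
      have h1 : m = Nat.bit false j := by simp [Nat.bit_val]; omega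
      have h2 : m - 1 = Nat.bit true (j - 1) := by simp [Nat.bit_val]; omega
      have h3 : m &&& (m - 1) = Nat.bit false (j &&& (j - 1)) := by
        rw [h2, h1, Nat.land_bit]; rfl
      constructor
      · intro h0
        rw [h3] at h0
        simp [Nat.bit_val] at h0
        obtain ⟨k, hk⟩ := (ih j (by omega) hj0).mp h0
        exact ⟨k + 1, by rw [pow_succ]; omega⟩
      · rintro ⟨k, hk⟩
        rcases k with _ | k
        · omega
        · have hjk : j = 2 ^ k := by rw [pow_succ] at hk; omega
          have := (ih j (by omega) hj0).mpr ⟨k, hjk⟩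
          rw [h3, this]; simp [Nat.bit_val]
    · -- m = 2*j + 1
      have h1 : m = Nat.bit true j := by simp [Nat.bit_val]; omega
      have h2 : m - 1 = Nat.bit false j := by simp [Nat.bit_val]; omega
      have h3 : m &&& (m - 1) = Nat.bit false j := by
        rw [h2, h1, Nat.land_bit, Bool.true_and, pv_land_self j]
      rw [h3]
      constructor
      · intro h0
        simp [Nat.bit_val] at h0
        exact ⟨0, by omega⟩
      · rintro ⟨k, hk⟩
        rcases k with _ | k
        · simp at hk; simp [Nat.bit_val]; omega
        · exfalso; rw [pow_succ] at hk; omega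

theorem pvALoop_pow (k : Nat) : ∀ pos : Int, pvALoop ((2:Int) ^ k) pos = pos + k := by
  induction k with
  | zero => intro pos; rw [pvALoop]; norm_num
  | succ k ih =>
    intro pos
    have h2 : (1:Int) < 2 ^ (k + 1) := by
      have : (2:Int) ^ 1 ≤ 2 ^ (k + 1) := pow_le_pow_right₀ (by norm_num) (by omega)
      simpa using this
    rw [pvALoop]
    have hdiv : PySem.Int.floordiv ((2:Int) ^ (k + 1)) 2 = 2 ^ k := by
      rw [PySem.Int.floordiv_eq_ediv_of_pos (by norm_num), pow_succ]
      exact Int.mul_ediv_cancel _ (by norm_num)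
    simp only [h2, dif_pos, hdiv, ih]
    push_cast; ring

theorem pvBLoop_pow2 (k : Nat) : pvBLoop ((2:Int) ^ k) = 2 ^ (k % 3) := by
  induction k using Nat.strong_induction_on with
  | _ k ih =>
    by_cases h3 : 3 ≤ k
    · have hk : k = (k - 3) + 3 := by omega
      have hsplit : (2:Int) ^ k = 2 ^ (k - 3) * 8 := by
        rw [hk, pow_add]; norm_num
      have hpos : (1:Int) ≤ 2 ^ k := one_le_pow₀ (by norm_num)
      have hmod : PySem.Int.mod ((2:Int) ^ k) 8 = 0 := by
        rw [PySem.Int.mod_eq_emod_of_pos (by norm_num), hsplit]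
        exact Int.mul_emod_left _ _
      have hdiv : PySem.Int.floordiv ((2:Int) ^ k) 8 = 2 ^ (k - 3) := by
        rw [PySem.Int.floordiv_eq_ediv_of_pos (by norm_num), hsplit]
        exact Int.mul_ediv_cancel _ (by norm_num)
      rw [pvBLoop, dif_pos ⟨hpos, hmod⟩, hdiv, ih (k - 3) (by omega)]
      congr 1; omega
    · have hk3 : k = 0 ∨ k = 1 ∨ k = 2 := by omega
      rw [pvBLoop, dif_neg]
      · congr 1; omega
      · rintro ⟨-, hmod⟩
        rcases hk3 with h | h | h <;> subst h <;> simp [PySem.Int.mod] at hmod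

theorem pvBLoop_eq_one (m : Nat) : ∀ n : Int, n.toNat = m → 1 ≤ n → pvBLoop n = 1 →
    ∃ k : Nat, n = (8:Int) ^ k := by
  induction m using Nat.strong_induction_on with
  | _ m ih =>
    intro n hm h1 hloop
    by_cases hc : PySem.Int.mod n 8 = 0
    · have hmul : PySem.Int.floordiv n 8 * 8 = n := by
        have := PySem.Int.floordiv_mul_add_mod n 8
        omega
      set q := PySem.Int.floordiv n 8 with hq
      have hq1 : 1 ≤ q := by nlinarith
      have hqlt : q.toNat < m := by
        subst hm
        rw [hq, PySem.Int.floordiv_eq_ediv_of_pos (by norm_num : (0:Int) < 8)]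
        omega
      rw [pvBLoop, dif_pos ⟨h1, hc⟩] at hloop
      obtain ⟨k, hk⟩ := ih q.toNat hqlt q rfl hq1 hloop
      exact ⟨k + 1, by rw [pow_succ]; omega⟩
    · rw [pvBLoop, dif_neg (by tauto)] at hloop
      exact ⟨0, by simpa using hloop⟩

theorem pv_main (n : Int) : is_power_of_8 n = is_power_of_8_alt n := by
  unfold is_power_of_8 is_power_of_8_alt
  by_cases hn : n ≤ 0
  · simp [hn]
  · rw [if_neg hn, if_neg hn]
    have hn1 : 1 ≤ n := by omega
    by_cases hl : n.toNat &&& (n.toNat - 1) = 0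
    · -- n is a power of two, say 2^k
      obtain ⟨k, hk⟩ := (pv_land_pred n.toNat (by omega)).mp hl
      have hnk : n = (2:Int) ^ k := by
        have := congrArg (fun x : Nat => (x : Int)) hk
        push_cast at this; omega
      rw [if_neg (by simpa using hl), hnk, pvALoop_pow k 0, pvBLoop_pow2 k]
      have hmod : PySem.Int.mod ((0:Int) + k) 3 = ((k % 3 : Nat) : Int) := by
        rw [PySem.Int.mod_eq_emod_of_pos (by norm_num)]
        push_cast; omega
      rw [hmod]
      have h3 : k % 3 = 0 ∨ k % 3 = 1 ∨ k % 3 = 2 := by omega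
      rcases h3 with h | h | h <;> rw [h] <;> norm_num
    · -- not a power of two: A returns false; B's loop cannot reach 1
      rw [if_pos (by simpa using hl)]
      symm
      rw [decide_eq_false_iff_not]
      intro hone
      obtain ⟨k, hk⟩ := pvBLoop_eq_one n.toNat n rfl hn1 hone
      apply hl
      apply (pv_land_pred n.toNat (by omega)).mpr
      refine ⟨3 * k, ?_⟩
      have : n.toNat = ((8:Int) ^ k).toNat := by rw [hk]
      rw [this]
      have h8 : ((8:Int) ^ k).toNat = 8 ^ k := by
        rw [show (8:Int) = ((8:Nat):Int) by norm_num, ← Nat.cast_pow, Int.toNat_natCast]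
      rw [h8, pow_mul]; norm_num

-- ===== VERDICT (by name: the statement is the Claim_ definition above) =====
theorem is_power_of_8_spec : Claim_equal_is_power_of_8 := by
  intro n _
  unfold Spec_is_power_of_8
  exact pv_main n
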